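-- pv_equiv track=rewrite | github.com/NoLayerCode/OpenCV | sendMe.py | min_transfer_time
-- ===== SOURCE A (Python) =====
-- def min_transfer_time(s):
--     count = {}
--     for c in s:
--         count[c] = count.get(c, 0) + 1
--     # count the number of times each character appears in the string
--
--     total_time = 0
--     for c, freq in count.items():
--         if freq == 1:
--             total_time += 10
--         else:
--             total_time += (freq // 2) * 20 + (freq % 2) * 10
--             # if the frequency is odd, we need to send one copy with Transfer 1
--             # and the rest with Transfer 2; hence the extra 10 seconds
--     return total_time
-- ===== SOURCE B (Python) =====
-- def min_transfer_time(s):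
--     # Each character costs 10 regardless of frequency:
--     # (f//2)*20 + (f%2)*10 == 10*f and the f==1 branch is 10.
--     return 10 * len(s)
-- ===== Notes on version B (the rewrite author's own statement) =====
-- stated objective: simpler
-- what changed: Replaced the frequency dictionary and the branching sum with the closed form 10*len(s), since each branch contributes exactly 10 per occurrence.
import Mathlib
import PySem

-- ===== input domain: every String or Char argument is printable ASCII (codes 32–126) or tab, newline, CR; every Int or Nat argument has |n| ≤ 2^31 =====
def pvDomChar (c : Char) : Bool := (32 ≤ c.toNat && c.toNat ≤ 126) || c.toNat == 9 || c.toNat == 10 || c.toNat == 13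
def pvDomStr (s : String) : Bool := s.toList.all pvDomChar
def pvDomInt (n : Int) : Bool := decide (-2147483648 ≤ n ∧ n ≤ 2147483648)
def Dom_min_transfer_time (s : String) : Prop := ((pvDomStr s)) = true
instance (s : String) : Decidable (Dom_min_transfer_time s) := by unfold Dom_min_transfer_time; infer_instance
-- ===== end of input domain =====

-- ===== PORT A =====
-- Port of A: build a character-frequency dict, then sum branch-dependent costs over its items.
def min_transfer_time (s : String) : Int :=
  let count := s.toList.foldl (fun d c => d.insert c (d.getD c 0 + 1)) PySem.Dict.empty
  count.items.foldl
    (fun total_time p =>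
      if p.2 == 1 then total_time + 10
      else total_time + (PySem.Int.floordiv p.2 2 * 20 + PySem.Int.mod p.2 2 * 10)) 0

-- ===== PORT B =====
-- Port of B: the closed form 10 * len(s); each character costs 10 in A regardless of frequency.
def min_transfer_time_alt (s : String) : Int :=
  10 * (PySem.Str.len s)

-- ===== PRECONDITION & SPEC =====
def Spec_min_transfer_time (s : String) (out : Int) : Prop := out = min_transfer_time_alt s
instance (s : String) (out : Int) : Decidable (Spec_min_transfer_time s out) := by unfold Spec_min_transfer_time; infer_instance

-- ===== CLAIM (what is proved, stated in full; the proofs are below) =====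
def Claim_equal_min_transfer_time : Prop := ∀ (s : String), Dom_min_transfer_time s → Spec_min_transfer_time s (min_transfer_time s)

-- ===== LEMMAS AND PROOFS =====

-- each item of the cost fold adds exactly 10 * its value
lemma cost_foldl_eq (l : List (Char × Int)) (init : Int) :
    l.foldl
      (fun total_time p =>
        if p.2 == 1 then total_time + 10
        else total_time + (PySem.Int.floordiv p.2 2 * 20 + PySem.Int.mod p.2 2 * 10)) init
    = init + 10 * (l.map (·.2)).sum := by
  induction l generalizing init with
  | nil => simp
  | cons p rest ih =>
    simp only [List.foldl_cons, List.map_cons, List.sum_cons, ih]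
    have h := PySem.Int.floordiv_mul_add_mod p.2 2
    by_cases h1 : p.2 = 1
    · simp [h1]; ring
    · simp only [beq_iff_eq, h1, if_false]
      ring_nf
      ring_nf at h
      omega

-- the distinct keys' counts sum back to the length of the list
lemma sum_counts_ofList (xs : List Char) :
    ((PySem.Set.ofList xs).map (fun k => (xs.count k : Int))).sum = (xs.length : Int) := by
  have hperm : (PySem.Set.ofList xs).Perm xs.dedup := by
    rw [List.perm_ext_iff_of_nodup (PySem.Set.nodup_ofList xs) xs.nodup_dedup]
    intro a
    rw [PySem.Set.mem_ofList, List.mem_dedup]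
  have := (hperm.map (fun k => (xs.count k : Int))).sum_eq
  rw [this]
  have : (xs.dedup.map (fun k => (xs.count k : Int))).sum
      = ((xs.dedup.map (fun k => xs.count k)).sum : Int) := by
    induction xs.dedup with
    | nil => simp
    | cons y ys ih => simp [ih]
  rw [this, List.sum_map_count_dedup_eq_length]

-- ===== VERDICT (by name: the statement is the Claim_ definition above) =====
theorem min_transfer_time_spec : Claim_equal_min_transfer_time := by
  intro s _
  unfold Spec_min_transfer_time min_transfer_time min_transfer_time_alt
  rw [PySem.Dict.foldl_insert_getD_add_one_eq_counter, cost_foldl_eq]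
  rw [PySem.Dict.items_counter]
  rw [List.map_map]
  have : ((fun x => x.2) ∘ fun k => (k, (s.toList.count k : Int)))
      = fun k => (s.toList.count k : Int) := rfl
  rw [this, sum_counts_ofList, PySem.Str.len_eq]
  ring
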